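-- pv_equiv track=rewrite | github.com/MarcinZmuda/Brajn2026 | prompt_v2/builders.py | _find_variants
-- ===== SOURCE A (Python) =====
-- def _find_variants(keyword, variant_dict):
--     if not keyword or not variant_dict:
--         return []
--     kw_lower = keyword.lower().strip()
--     for key, variants in variant_dict.items():
--         if key.lower().strip() == kw_lower:
--             return variants
--     kw_stems = set(w[:4] for w in kw_lower.split() if len(w) >= 4)
--     if not kw_stems:
--         return []
--     for key, variants in variant_dict.items():
--         key_stems = set(w[:4] for w in key.lower().split() if len(w) >= 4)
--         if kw_stems and key_stems and kw_stems & key_stems: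
--             return variants
--     return []
-- ===== SOURCE B (Python) =====
-- def _find_variants(keyword, variant_dict):
--     if not keyword or not variant_dict:
--         return []
--     kw_lower = keyword.lower().strip()
--     kw_stems = set(w[:4] for w in kw_lower.split() if len(w) >= 4)
--     pending = None
--     for key, variants in variant_dict.items():
--         if key.lower().strip() == kw_lower:
--             return variants
--         if pending is None and kw_stems:
--             key_stems = set(w[:4] for w in key.lower().split() if len(w) >= 4)
--             if kw_stems & key_stems:
--                 pending = variants
--     return pending if pending is not None else []
-- ===== Notes on version B (the rewrite author's own statement) =====
-- stated objective: alternative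
-- what changed: B fuses A's two separate scans of variant_dict into a single pass that returns immediately on an exact key match and records the first stem-overlapping key's variants as a deferred fallback returned only after the loop.
import Mathlib
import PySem

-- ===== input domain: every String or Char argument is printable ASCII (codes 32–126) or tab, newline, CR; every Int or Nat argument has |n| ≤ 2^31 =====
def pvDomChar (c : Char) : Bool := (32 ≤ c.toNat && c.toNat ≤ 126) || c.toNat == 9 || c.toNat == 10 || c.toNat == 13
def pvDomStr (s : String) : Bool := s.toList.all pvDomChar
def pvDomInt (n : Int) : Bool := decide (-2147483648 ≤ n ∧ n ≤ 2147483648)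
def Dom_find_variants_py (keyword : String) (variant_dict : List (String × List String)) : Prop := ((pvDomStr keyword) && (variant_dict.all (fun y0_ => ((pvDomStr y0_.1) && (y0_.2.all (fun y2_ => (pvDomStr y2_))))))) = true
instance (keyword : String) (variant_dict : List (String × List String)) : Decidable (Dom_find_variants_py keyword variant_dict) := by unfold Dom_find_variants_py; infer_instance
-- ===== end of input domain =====

-- B fuses A's two dict scans into one pass with a deferred stem-fallback candidate; same return value, same cost class (objective: alternative).

-- set(w[:4] for w in ws if len(w) >= 4), shared by both ports (both Pythons build this identical set expression)
def pvStems4 (ws : List String) : PySem.Set String :=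
  PySem.Set.ofList ((ws.filter (fun w => 4 ≤ PySem.Str.len w)).map (fun w => PySem.Str.slice w none (some 4)))

-- ===== PORT A =====
-- A's first loop: return variants on exact (lower+strip) key match, else keep scanning
def pvAExact (kw_lower : String) : List (String × List String) → Option (List String)
  | [] => none
  | (key, variants) :: rest =>
      if PySem.Str.strip (PySem.Str.lower key) = kw_lower then some variants
      else pvAExact kw_lower rest

-- A's second loop: return variants of the first key whose stems overlap kw_stems
def pvAStem (kw_stems : PySem.Set String) : List (String × List String) → List String
  | [] => []
  | (key, variants) :: rest =>
      let key_stems := pvStems4 (PySem.Str.split₀ (PySem.Str.lower key))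
      if kw_stems ≠ [] ∧ key_stems ≠ [] ∧ PySem.Set.inter kw_stems key_stems ≠ [] then variants
      else pvAStem kw_stems rest

def find_variants_py (keyword : String) (variant_dict : List (String × List String)) : List String :=
  if keyword = "" ∨ variant_dict = [] then []
  else
    let kw_lower := PySem.Str.strip (PySem.Str.lower keyword)
    match pvAExact kw_lower variant_dict with
    | some variants => variants
    | none =>
      let kw_stems := pvStems4 (PySem.Str.split₀ kw_lower)
      if kw_stems = [] then []
      else pvAStem kw_stems variant_dict

-- ===== PORT B =====
-- B's single loop: exact match returns at once; first stem overlap is recorded as pending and returned after the loop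
def pvBLoop (kw_lower : String) (kw_stems : PySem.Set String) (pending : Option (List String)) :
    List (String × List String) → List String
  | [] => match pending with | some p => p | none => []
  | (key, variants) :: rest =>
      if PySem.Str.strip (PySem.Str.lower key) = kw_lower then variants
      else
        let pending' :=
          if pending = none ∧ kw_stems ≠ [] ∧
             PySem.Set.inter kw_stems (pvStems4 (PySem.Str.split₀ (PySem.Str.lower key))) ≠ [] then
            some variants
          else pending
        pvBLoop kw_lower kw_stems pending' rest

def find_variants_py_alt (keyword : String) (variant_dict : List (String × List String)) : List String :=
  if keyword = "" ∨ variant_dict = [] then []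
  else
    let kw_lower := PySem.Str.strip (PySem.Str.lower keyword)
    let kw_stems := pvStems4 (PySem.Str.split₀ kw_lower)
    pvBLoop kw_lower kw_stems none variant_dict

-- ===== PRECONDITION & SPEC =====
def Spec_find_variants_py (keyword : String) (variant_dict : List (String × List String)) (out : List String) : Prop := out = find_variants_py_alt keyword variant_dict
instance (keyword : String) (variant_dict : List (String × List String)) (out : List String) : Decidable (Spec_find_variants_py keyword variant_dict out) := by unfold Spec_find_variants_py; infer_instance

-- ===== CLAIM (what is proved, stated in full; the proofs are below) =====
def Claim_equal_find_variants_py : Prop := ∀ (keyword : String) (variant_dict : List (String × List String)), Dom_find_variants_py keyword variant_dict → Spec_find_variants_py keyword variant_dict (find_variants_py keyword variant_dict)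

-- ===== LEMMAS AND PROOFS =====

lemma inter_ne_right {s t : PySem.Set String} (h : PySem.Set.inter s t ≠ []) : t ≠ [] := by
  intro ht; subst ht; exact h (by simp [PySem.Set.inter])

lemma pvAStem_empty (vd : List (String × List String)) : pvAStem [] vd = [] := by
  induction vd with
  | nil => rfl
  | cons kv rest ih => cases kv with | mk k v => simp [pvAStem, ih]

lemma pvBLoop_eq (kw_lower : String) (kw_stems : PySem.Set String)
    (vd : List (String × List String)) (pending : Option (List String)) :
    pvBLoop kw_lower kw_stems pending vd =
      match pvAExact kw_lower vd with
      | some v => v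
      | none =>
        match pending with
        | some p => p
        | none => pvAStem kw_stems vd := by
  induction vd generalizing pending with
  | nil => cases pending <;> simp [pvBLoop, pvAExact, pvAStem]
  | cons kv rest ih =>
    cases kv with
    | mk key variants =>
      by_cases hex : PySem.Str.strip (PySem.Str.lower key) = kw_lower
      · simp [pvBLoop, pvAExact, hex]
      · simp only [pvBLoop, pvAExact, hex, if_neg, if_false, ite_false]
        rw [ih]
        cases pending with
        | some p => simp [pvAStem]
        | none =>
          by_cases hkw : kw_stems = ([] : PySem.Set String)
          · subst hkw
            simp [pvAStem_empty, pvAStem]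
          · by_cases hint : PySem.Set.inter kw_stems (pvStems4 (PySem.Str.split₀ (PySem.Str.lower key))) ≠ []
            · have hkey : pvStems4 (PySem.Str.split₀ (PySem.Str.lower key)) ≠ [] := inter_ne_right hint
              simp [pvAStem, hkw, hkey, hint]
            · simp [pvAStem, hkw, hint]

-- ===== VERDICT (by name: the statement is the Claim_ definition above) =====
theorem find_variants_py_spec : Claim_equal_find_variants_py := by
  intro keyword variant_dict _
  unfold Spec_find_variants_py find_variants_py find_variants_py_alt
  by_cases hg : keyword = "" ∨ variant_dict = []
  · simp [hg]
  · simp only [hg, if_false, ite_false]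
    rw [pvBLoop_eq]
    cases hA : pvAExact (PySem.Str.strip (PySem.Str.lower keyword)) variant_dict with
    | some v => simp
    | none =>
      by_cases hkw : pvStems4 (PySem.Str.split₀ (PySem.Str.strip (PySem.Str.lower keyword))) = []
      · simp [hkw, pvAStem_empty]
      · simp [hkw]
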